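-- pv_equiv track=rewrite | github.com/ibm-mas/ansible-devops | build/scripts/fix_readme_structure.py | _remove_duplicate_sections
-- ===== SOURCE A (Python) =====
-- from typing import List, Tuple
--
-- def _remove_duplicate_sections(content: str) -> Tuple[str, List[str]]:
--     """Remove duplicate sections (e.g., multiple License sections)"""
--     fixes = []
--     lines = content.split('\n')
--
--     # Track sections we've seen
--     seen_sections = {}
--     new_lines = []
--     i = 0
--
--     while i < len(lines):
--         line = lines[i].strip()
--
--         # Check if this is a section heading
--         if line.startswith('## '):
--             section_name = line[3:].strip()
--
--             if section_name in seen_sections: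
--                 # This is a duplicate - skip until next section or end
--                 fixes.append(f"Removed duplicate section: {section_name}")
--                 i += 1
--                 # Skip content until next section
--                 while i < len(lines) and not lines[i].strip().startswith('## '):
--                     i += 1
--                 continue
--             else:
--                 seen_sections[section_name] = True
--
--         new_lines.append(lines[i])
--         i += 1
--
--     if fixes:
--         content = '\n'.join(new_lines)
--
--     return content, fixes
-- ===== SOURCE B (Python) =====
-- from typing import List, Tuple
--
-- def _remove_duplicate_sections(content: str) -> Tuple[str, List[str]]:
--     """Remove duplicate sections, block-wise: split into (preamble + one block
--     per '## ' heading), then keep the first block of each section name."""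
--     lines = content.split('\n')
--     # pass 1: group lines into blocks; the pending block is (name, cur)
--     blocks = []
--     name, cur = None, []
--     for ln in lines:
--         s = ln.strip()
--         if s.startswith('## '):
--             blocks.append((name, cur))
--             name, cur = s[3:].strip(), [ln]
--         else:
--             cur.append(ln)
--     blocks.append((name, cur))
--     # pass 2: keep preamble and the first block per name
--     seen = set()
--     kept = []
--     fixes = []
--     for name, blk in blocks:
--         if name is not None and name in seen:
--             fixes.append(f"Removed duplicate section: {name}")
--         else:
--             if name is not None:
--                 seen.add(name)
--             kept.extend(blk)
--     if not fixes:
--         return content, fixes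
--     return '\n'.join(kept), fixes
-- ===== Notes on version B (the rewrite author's own statement) =====
-- stated objective: alternative
-- what changed: Replaced A's index-based while loop with an inner skip-ahead loop by a two-pass block decomposition: split the lines once into heading-delimited blocks, then filter blocks by first occurrence of each section name.
import Mathlib
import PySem

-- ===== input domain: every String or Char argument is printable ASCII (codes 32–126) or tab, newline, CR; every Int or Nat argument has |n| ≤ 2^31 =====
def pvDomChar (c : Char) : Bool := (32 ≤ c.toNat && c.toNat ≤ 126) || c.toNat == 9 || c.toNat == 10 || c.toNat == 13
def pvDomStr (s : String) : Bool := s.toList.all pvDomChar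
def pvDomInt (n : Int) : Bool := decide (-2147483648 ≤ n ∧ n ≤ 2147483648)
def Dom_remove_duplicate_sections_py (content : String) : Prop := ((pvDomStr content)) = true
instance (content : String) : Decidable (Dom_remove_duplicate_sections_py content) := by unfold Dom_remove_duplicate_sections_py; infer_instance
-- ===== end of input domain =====

-- B replaces A's single while loop with inner skip-ahead by an explicit block decomposition
-- (split lines into heading-delimited blocks, then keep first block per name); alternative, not faster.

-- ===== PORT A =====
-- inner 'while i < len(lines) and not lines[i].strip().startswith('## '): i += 1'
def pvSkipDup : List String → List String
  | [] => []
  | l :: rest =>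
    if PySem.Str.startswith (PySem.Str.strip l) "## " then l :: rest else pvSkipDup rest

theorem pvSkipDup_length_le (ls : List String) : (pvSkipDup ls).length ≤ ls.length := by
  induction ls with
  | nil => simp [pvSkipDup]
  | cons l rest ih =>
    simp only [pvSkipDup]
    split
    · simp
    · exact Nat.le_succ_of_le ih

-- the main 'while i < len(lines)' loop of A, over the remaining lines and the seen dict
def pvLoopA : List String → PySem.Dict String Bool → List String × List String
  | [], _ => ([], [])
  | l :: rest, seen =>
    let line := PySem.Str.strip l
    if PySem.Str.startswith line "## " then
      let name := PySem.Str.strip (PySem.Str.slice line (some 3) none)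
      if seen.contains name then
        let r := pvLoopA (pvSkipDup rest) seen
        (r.1, ("Removed duplicate section: " ++ name) :: r.2)
      else
        let r := pvLoopA rest (seen.insert name true)
        (l :: r.1, r.2)
    else
      let r := pvLoopA rest seen
      (l :: r.1, r.2)
termination_by ls _ => ls.length
decreasing_by
  · exact Nat.lt_succ_of_le (pvSkipDup_length_le rest)
  · exact Nat.lt_succ_self _
  · exact Nat.lt_succ_self _

def remove_duplicate_sections_py (content : String) : String × List String :=
  let lines := (PySem.Str.split? content "\n").getD []   -- sep "\n" ≠ "", so split? is always some
  let r := pvLoopA lines PySem.Dict.empty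
  (if r.2 = [] then content else PySem.Str.join "\n" r.1, r.2)

-- ===== PORT B =====
-- pass 1 of Source B: the for loop grouping lines into blocks, state = pending block (name, cur)
def pvSplitBlocks : List String → Option String × List String → List (Option String × List String)
  | [], pb => [pb]
  | ln :: rest, (name, cur) =>
    let s := PySem.Str.strip ln
    if PySem.Str.startswith s "## " then
      (name, cur) :: pvSplitBlocks rest (some (PySem.Str.strip (PySem.Str.slice s (some 3) none)), [ln])
    else
      pvSplitBlocks rest (name, cur ++ [ln])

-- pass 2 of Source B: keep preamble and the first block per section name
def pvKeepBlocks : List (Option String × List String) → PySem.Set String → List String × List String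
  | [], _ => ([], [])
  | (none, blk) :: rest, seen =>
    let r := pvKeepBlocks rest seen
    (blk ++ r.1, r.2)
  | (some n, blk) :: rest, seen =>
    if PySem.Set.contains seen n then
      let r := pvKeepBlocks rest seen
      (r.1, ("Removed duplicate section: " ++ n) :: r.2)
    else
      let r := pvKeepBlocks rest (PySem.Set.add seen n)
      (blk ++ r.1, r.2)

def remove_duplicate_sections_py_alt (content : String) : String × List String :=
  let lines := (PySem.Str.split? content "\n").getD []   -- sep "\n" ≠ "", so split? is always some
  let r := pvKeepBlocks (pvSplitBlocks lines (none, [])) PySem.Set.empty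
  if r.2 = [] then (content, r.2) else (PySem.Str.join "\n" r.1, r.2)

-- ===== PRECONDITION & SPEC =====
def Spec_remove_duplicate_sections_py (content : String) (out : String × List String) : Prop := out = remove_duplicate_sections_py_alt content
instance (content : String) (out : String × List String) : Decidable (Spec_remove_duplicate_sections_py content out) := by unfold Spec_remove_duplicate_sections_py; infer_instance

-- ===== CLAIM (what is proved, stated in full; the proofs are below) =====
def Claim_equal_remove_duplicate_sections_py : Prop := ∀ (content : String), Dom_remove_duplicate_sections_py content → Spec_remove_duplicate_sections_py content (remove_duplicate_sections_py content)


theorem pv_set_contains_add (s : PySem.Set String) (n m : String) :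
    PySem.Set.contains (PySem.Set.add s n) m = (m == n || PySem.Set.contains s m) := by
  by_cases hm : m = n <;> by_cases hs : m ∈ s <;>
    simp [PySem.Set.add_eq_ite, hm, hs] <;> split_ifs with h <;> simp_all

theorem pv_dict_set_step (d : PySem.Dict String Bool) (s : PySem.Set String) (n : String)
    (h : ∀ m, d.contains m = PySem.Set.contains s m) :
    ∀ m, (d.insert n true).contains m = PySem.Set.contains (PySem.Set.add s n) m := by
  intro m
  rw [PySem.Dict.contains_insert, pv_set_contains_add, h m]


theorem pv_keep_split (rest : List String) :
    ∀ (cur : List String) (pnd : Option String) (d : PySem.Dict String Bool) (s : PySem.Set String),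
    (∀ m, d.contains m = PySem.Set.contains s m) →
    pvKeepBlocks (pvSplitBlocks rest (pnd, cur)) s =
      (match pnd with
       | none => ((cur ++ (pvLoopA rest d).1, (pvLoopA rest d).2) : List String × List String)
       | some n =>
         if PySem.Set.contains s n then
           ((pvLoopA (pvSkipDup rest) d).1,
            ("Removed duplicate section: " ++ n) :: (pvLoopA (pvSkipDup rest) d).2)
         else
           (cur ++ (pvLoopA rest (d.insert n true)).1, (pvLoopA rest (d.insert n true)).2)) := by
  induction rest with
  | nil =>
    intro cur pnd d s h
    cases pnd with
    | none => simp [pvSplitBlocks, pvKeepBlocks, pvLoopA]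
    | some n => simp only [pvSplitBlocks, pvKeepBlocks, pvSkipDup, pvLoopA]
  | cons ln rest ih =>
    intro cur pnd d s h
    by_cases hb : PySem.Str.startswith (PySem.Str.strip ln) "## " = true
    case pos =>
      have hd := h (PySem.Str.strip (PySem.Str.slice (PySem.Str.strip ln) (some 3) none))
      have hskip : pvSkipDup (ln :: rest) = ln :: rest := by
        simp only [pvSkipDup]; rw [if_pos hb]
      cases pnd with
      | none =>
        simp only [pvSplitBlocks]
        rw [if_pos hb]
        simp only [pvKeepBlocks]
        rw [ih _ _ d s h]
        conv_rhs => simp only [pvLoopA]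
        rw [if_pos hb, hd]
        by_cases hc : PySem.Set.contains s (PySem.Str.strip (PySem.Str.slice (PySem.Str.strip ln) (some 3) none)) = true <;>
          simp [hc]
      | some n =>
        by_cases hn : PySem.Set.contains s n = true
        · simp only [pvSplitBlocks]
          rw [if_pos hb]
          simp only [pvKeepBlocks]
          rw [if_pos hn, ih _ _ d s h, hskip]
          conv_rhs => simp only [pvLoopA]
          rw [if_pos hn, if_pos hb, hd]
          by_cases hc : PySem.Set.contains s (PySem.Str.strip (PySem.Str.slice (PySem.Str.strip ln) (some 3) none)) = true <;>
            simp [hc]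
        · have hd' := pv_dict_set_step d s n h (PySem.Str.strip (PySem.Str.slice (PySem.Str.strip ln) (some 3) none))
          simp only [pvSplitBlocks]
          rw [if_pos hb]
          simp only [pvKeepBlocks]
          rw [if_neg hn, ih _ _ (d.insert n true) (PySem.Set.add s n) (pv_dict_set_step d s n h)]
          conv_rhs => simp only [pvLoopA]
          rw [if_neg hn, if_pos hb, hd']
          by_cases hc : PySem.Set.contains (PySem.Set.add s n) (PySem.Str.strip (PySem.Str.slice (PySem.Str.strip ln) (some 3) none)) = true <;>
            simp [hc]
    case neg =>
      have hskip : pvSkipDup (ln :: rest) = pvSkipDup rest := by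
        simp only [pvSkipDup]; rw [if_neg hb]
      cases pnd with
      | none =>
        simp only [pvSplitBlocks]
        rw [if_neg hb]
        rw [ih _ _ d s h]
        conv_rhs => simp only [pvLoopA]
        rw [if_neg hb]
        simp
      | some n =>
        simp only [pvSplitBlocks]
        rw [if_neg hb]
        rw [ih _ _ d s h, hskip]
        by_cases hn : PySem.Set.contains s n = true
        · have hn' : n ∈ s := (PySem.Set.contains_iff _ _).mp hn
          simp [hn']
        · have hn' : n ∉ s := fun hm => hn ((PySem.Set.contains_iff _ _).mpr hm)
          conv_rhs => simp only [pvLoopA]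
          rw [if_neg hb]
          simp [hn']

theorem pv_empty_inv : ∀ m : String, (PySem.Dict.empty (κ := String) (ν := Bool)).contains m
    = PySem.Set.contains (PySem.Set.empty (α := String)) m := by
  intro m
  simp [PySem.Dict.contains_empty, PySem.Set.empty, PySem.Set.contains]

-- ===== VERDICT (by name: the statement is the Claim_ definition above) =====
theorem remove_duplicate_sections_py_spec : Claim_equal_remove_duplicate_sections_py := by
  intro content _
  unfold Spec_remove_duplicate_sections_py remove_duplicate_sections_py remove_duplicate_sections_py_alt
  have hK := pv_keep_split ((PySem.Str.split? content "\n").getD []) [] none PySem.Dict.empty PySem.Set.empty pv_empty_inv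
  simp only [List.nil_append] at hK
  simp only [hK]
  split_ifs with hfix <;> simp [hfix]
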